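-- pv_equiv track=rewrite | github.com/NirSanasm/movie_reservation | app/api/v1/screening.py | generate_seat_layout
-- ===== SOURCE A (Python) =====
-- def generate_seat_layout(total_seats: int) -> list[str]:
--     """
--     Generate seat labels for a theater.
--     Format: Row letter (A-Z) + Seat number (1-10)
--     Example: A1, A2, ..., A10, B1, B2, ...
--     """
--     seats = []
--     seats_per_row = 10
--     row_count = (total_seats + seats_per_row - 1) // seats_per_row
--
--     for row_idx in range(min(row_count, 26)):  # Max 26 rows (A-Z)
--         row_letter = chr(65 + row_idx)  # A=65 in ASCII
--         for seat_num in range(1, seats_per_row + 1):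
--             if len(seats) >= total_seats:
--                 break
--             seats.append(f"{row_letter}{seat_num}")
--
--     return seats
-- ===== SOURCE B (Python) =====
-- def generate_seat_layout(total_seats: int) -> list[str]:
--     n = min(total_seats, 260)  # cap: 26 rows of 10 seats
--     return [f"{chr(65 + i // 10)}{i % 10 + 1}" for i in range(n)]
-- ===== Notes on version B (the rewrite author's own statement) =====
-- stated objective: idiomatic
-- what changed: Replaces the nested row/seat loops with a length-based break by a single flat list comprehension over min(total_seats, 260) indices, deriving row letter and seat number by divmod arithmetic.
import Mathlib
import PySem

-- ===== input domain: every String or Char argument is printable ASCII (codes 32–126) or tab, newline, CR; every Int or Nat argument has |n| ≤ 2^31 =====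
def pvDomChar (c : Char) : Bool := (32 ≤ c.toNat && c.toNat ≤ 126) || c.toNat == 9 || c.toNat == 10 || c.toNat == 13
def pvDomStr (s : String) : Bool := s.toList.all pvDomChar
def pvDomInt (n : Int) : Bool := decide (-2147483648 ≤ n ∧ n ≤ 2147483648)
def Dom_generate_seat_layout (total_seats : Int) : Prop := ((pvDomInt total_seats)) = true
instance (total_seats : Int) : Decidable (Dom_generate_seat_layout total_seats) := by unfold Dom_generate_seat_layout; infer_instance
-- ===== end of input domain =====

-- B replaces A's nested row/seat loops (with a length-based break) by one flat pass over
-- min(total_seats, 260) indices using divmod arithmetic; objective: idiomatic, same cost.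

-- ===== PORT A =====
-- inner `for seat_num in range(1, seats_per_row+1)` with its `break` (the break returns the
-- current seats and skips the rest of the row)
def pvInnerA (t : Int) (rowLetter : Char) : List Int → List String → List String
  | [], seats => seats
  | n :: ns, seats =>
    if (seats.length : Int) ≥ t then seats   -- `if len(seats) >= total_seats: break`
    else pvInnerA t rowLetter ns (seats ++ [String.mk [rowLetter] ++ PySem.Int.toStr n])

-- outer `for row_idx in range(min(row_count, 26))`; chr(65+row_idx) ported by hand as
-- Char.ofNat (exact here: row_idx ∈ 0..25, codes 65..90)
def pvOuterA (t : Int) : List Int → List String → List String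
  | [], seats => seats
  | r :: rs, seats =>
    pvOuterA t rs (pvInnerA t (Char.ofNat (65 + r).toNat) (PySem.List.pyRange 1 (10 + 1) 1) seats)

def generate_seat_layout (total_seats : Int) : List String :=
  pvOuterA total_seats
    (PySem.List.pyRange 0 (min (PySem.Int.floordiv (total_seats + 10 - 1) 10) 26) 1) []

-- ===== PORT B =====
-- f"{chr(65 + i // 10)}{i % 10 + 1}" ; chr ported by hand as Char.ofNat (exact: codes 65..90)
def pvLab (i : Int) : String :=
  String.mk [Char.ofNat (65 + PySem.Int.floordiv i 10).toNat]
    ++ PySem.Int.toStr (PySem.Int.mod i 10 + 1)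

def generate_seat_layout_alt (total_seats : Int) : List String :=
  (PySem.List.pyRange 0 (min total_seats 260) 1).map pvLab

-- ===== PRECONDITION & SPEC =====
def Spec_generate_seat_layout (total_seats : Int) (out : List String) : Prop := out = generate_seat_layout_alt total_seats
instance (total_seats : Int) (out : List String) : Decidable (Spec_generate_seat_layout total_seats out) := by unfold Spec_generate_seat_layout; infer_instance

-- ===== CLAIM (what is proved, stated in full; the proofs are below) =====
def Claim_equal_generate_seat_layout : Prop := ∀ (total_seats : Int), Dom_generate_seat_layout total_seats → Spec_generate_seat_layout total_seats (generate_seat_layout total_seats)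

-- ===== LEMMAS AND PROOFS =====

-- B's label at flat index 10*r+s is A's label for row r, seat s+1
theorem pvLab_eq (r s : Int) (hr : 0 ≤ r) (hs0 : 0 ≤ s) (hs : s < 10) :
    pvLab (10 * r + s) = String.mk [Char.ofNat (65 + r).toNat] ++ PySem.Int.toStr (s + 1) := by
  have hfd : PySem.Int.floordiv (10 * r + s) 10 = r := by
    rw [PySem.Int.floordiv_eq_iff_of_pos (by norm_num)]; omega
  have hmod : PySem.Int.mod (10 * r + s) 10 = s := by
    have := PySem.Int.floordiv_mul_add_mod (10 * r + s) 10
    rw [hfd] at this; omega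
  simp only [pvLab]
  rw [hfd, hmod]

theorem pvInnerA_ge (t : Int) (c : Char) (ns : List Int) (seats : List String)
    (h : (seats.length : Int) ≥ t) : pvInnerA t c ns seats = seats := by
  cases ns <;> simp [pvInnerA, h]

theorem pvOuterA_ge (t : Int) (rows : List Int) (seats : List String)
    (h : (seats.length : Int) ≥ t) : pvOuterA t rows seats = seats := by
  induction rows with
  | nil => rfl
  | cons r rs ih => simp [pvOuterA, pvInnerA_ge t _ _ _ h, ih]

theorem pvInnerA_spec (k : Nat) (hk : k ≤ 10) (t r : Int) (hr : 0 ≤ r) :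
    ∀ (seats : List String), (seats.length : Int) = 10 * r + (10 - k) →
    pvInnerA t (Char.ofNat (65 + r).toNat) (PySem.List.pyRange (11 - (k : Int)) 11 1) seats
      = seats ++ (List.range (min (t - seats.length).toNat k)).map
          (fun (j : Nat) => pvLab ((seats.length : Int) + (j : Int))) := by
  induction k with
  | zero =>
    intro seats _
    rw [PySem.List.pyRange_one_eq_nil (by norm_num)]
    simp [pvInnerA]
  | succ k ih =>
    intro seats hlen
    simp only [Nat.cast_add, Nat.cast_one] at hlen ⊢
    rw [PySem.List.pyRange_one_cons (by push_cast; omega), pvInnerA]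
    by_cases hge : (seats.length : Int) ≥ t
    · rw [if_pos hge]
      have h0 : (t - (seats.length : Int)).toNat = 0 := by omega
      simp [h0]
    · rw [if_neg hge]
      have hlab : String.mk [Char.ofNat (65 + r).toNat] ++ PySem.Int.toStr (11 - ((k : Int) + 1))
          = pvLab (seats.length : Int) := by
        have hs : (seats.length : Int) = 10 * r + (9 - (k : Int)) := by push_cast at hlen ⊢; omega
        rw [hs, pvLab_eq r (9 - (k : Int)) hr (by omega) (by omega)]
        congr 2
        ring
      rw [hlab, show (11 - ((k : Int) + 1) + 1) = 11 - (k : Int) from by ring]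
      have hlen' : (((seats ++ [pvLab (seats.length : Int)]).length : Nat) : Int)
          = 10 * r + (10 - (k : Int)) := by
        simp; push_cast at hlen ⊢; omega
      rw [ih (by omega) _ hlen']
      have hm : min (t - (seats.length : Int)).toNat (k + 1)
          = (min (t - ((seats ++ [pvLab (seats.length : Int)]).length : Int)).toNat k) + 1 := by
        simp; omega
      rw [hm, List.range_succ_eq_map]
      simp only [List.map_cons, List.map_map, List.append_assoc, List.singleton_append,
        List.length_append, List.length_singleton, Nat.cast_add, Nat.cast_one, Nat.cast_zero]
      congr 1
      congr 1
      apply List.map_congr_left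
      intro a _
      simp only [Function.comp_apply]
      congr 1
      push_cast
      ring

-- the inner loop over the full seat range of one row, at row r with 10*r seats built so far
theorem pvInnerA_row (t r : Int) (hr : 0 ≤ r) (seats : List String)
    (hlen : (seats.length : Int) = 10 * r) :
    pvInnerA t (Char.ofNat (65 + r).toNat) (PySem.List.pyRange 1 (10 + 1) 1) seats
      = seats ++ (List.range (min (t - seats.length).toNat 10)).map
          (fun (j : Nat) => pvLab ((seats.length : Int) + (j : Int))) := by
  have h := pvInnerA_spec 10 (by norm_num) t r hr seats (by push_cast at hlen ⊢; omega)
  rw [show (11 : Int) - ((10 : Nat) : Int) = 1 from by norm_num] at h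
  rw [show (10 : Int) + 1 = 11 from by norm_num]
  exact h

theorem pvOuterA_spec (t R : Int) (hR0 : 0 ≤ R) (hR : R ≤ 26) :
    ∀ (k : Nat), (k : Int) ≤ R → ∀ (seats : List String),
    (seats.length : Int) = 10 * (R - k) →
    pvOuterA t (PySem.List.pyRange (R - (k : Int)) R 1) seats
      = seats ++ (List.range (min (t - seats.length).toNat (10 * k))).map
          (fun (j : Nat) => pvLab ((seats.length : Int) + (j : Int))) := by
  intro k
  induction k with
  | zero =>
    intro _ seats _
    rw [PySem.List.pyRange_one_eq_nil (by omega)]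
    simp [pvOuterA]
  | succ k ih =>
    intro hkR seats hlen
    simp only [Nat.cast_add, Nat.cast_one] at hkR hlen ⊢
    rw [PySem.List.pyRange_one_cons (by omega), pvOuterA]
    rw [pvInnerA_row t (R - ((k : Int) + 1)) (by omega) seats (by push_cast at hlen ⊢; omega)]
    set L : Int := (seats.length : Int) with hL
    by_cases hfull : L + 10 ≤ t
    · -- full row: recurse with the invariant
      rw [show min (t - L).toNat 10 = 10 from by omega]
      set seats1 := seats ++ (List.range 10).map (fun (j : Nat) => pvLab (L + (j : Int)))
        with hs1
      have hlen1 : (seats1.length : Int) = 10 * (R - (k : Int)) := by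
        simp [hs1]; push_cast at hlen ⊢; omega
      rw [show R - ((k : Int) + 1) + 1 = R - (k : Int) from by ring, ih (by omega) seats1 hlen1]
      have hlen1' : (seats1.length : Int) = L + 10 := by simp [hs1, hL]
      rw [hlen1']
      rw [show min (t - L).toNat (10 * (k + 1)) = 10 + min (t - (L + 10)).toNat (10 * k)
        from by omega]
      rw [List.range_add, List.map_append]
      simp only [hs1, List.map_map, List.append_assoc]
      congr 2
      apply List.map_congr_left
      intro a _
      simp only [Function.comp]
      congr 1
      push_cast
      ring
    · -- partial (or empty) row: every later row appends nothing
      rw [show min (t - L).toNat 10 = (t - L).toNat from by omega]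
      set seats1 := seats ++ (List.range (t - L).toNat).map
        (fun (j : Nat) => pvLab (L + (j : Int))) with hs1
      have hge1 : (seats1.length : Int) ≥ t := by simp [hs1, hL]; omega
      rw [pvOuterA_ge t _ _ hge1]
      rw [show min (t - L).toNat (10 * (k + 1)) = (t - L).toNat from by omega]

theorem generate_seat_layout_eq (t : Int) :
    generate_seat_layout t = generate_seat_layout_alt t := by
  unfold generate_seat_layout generate_seat_layout_alt
  set rc : Int := PySem.Int.floordiv (t + 10 - 1) 10 with hrc
  have hchar : rc * 10 + PySem.Int.mod (t + 10 - 1) 10 = t + 10 - 1 := by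
    rw [hrc]; exact PySem.Int.floordiv_mul_add_mod (t + 10 - 1) 10
  have hmlo := PySem.Int.mod_nonneg (t + 10 - 1) (b := 10) (by norm_num)
  have hmhi := PySem.Int.mod_lt (t + 10 - 1) (b := 10) (by norm_num)
  by_cases hpos : 1 ≤ t
  · have hrc1 : 1 ≤ rc := by omega
    set R : Int := min rc 26 with hR
    have hR1 : 1 ≤ R := by omega
    have hR26 : R ≤ 26 := by omega
    have hk : ((R.toNat : Nat) : Int) = R := by omega
    have hA := pvOuterA_spec t R (by omega) hR26 R.toNat (by omega) []
      (by simp; omega)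
    rw [show R - (R.toNat : Int) = 0 from by omega] at hA
    rw [hA, PySem.List.pyRange_one]
    simp only [List.length_nil, Nat.cast_zero, List.nil_append, List.map_map, sub_zero]
    rw [show min t.toNat (10 * R.toNat) = (min t 260).toNat from by omega]
    apply List.map_congr_left
    intro a _
    simp [Function.comp]
  · -- total_seats ≤ 0: both ranges are empty
    have h1 : min rc 26 ≤ 0 := by omega
    rw [PySem.List.pyRange_one_eq_nil h1, PySem.List.pyRange_one_eq_nil (by omega)]
    simp [pvOuterA]

-- ===== VERDICT (by name: the statement is the Claim_ definition above) =====
theorem generate_seat_layout_spec : Claim_equal_generate_seat_layout := by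
  intro t _
  unfold Spec_generate_seat_layout
  exact generate_seat_layout_eq t
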